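-- pv_equiv track=rewrite | github.com/IsseBisse/adventofcode | 2021/python/3/BinaryDiagnostic.py | select_diagnostics
-- ===== SOURCE A (Python) =====
-- def select_diagnostics(diagnostics, bit_ind, most_common=True):
--     num_ones = sum([line[bit_ind] for line in diagnostics])
--     num_zeros = len(diagnostics) - num_ones
--
--     # This could probably be simplified
--     if most_common:
--         selective_bit = 1 if num_ones >= num_zeros else 0
--
--     else:
--         selective_bit = 0 if num_zeros <= num_ones else 1
--
--     selected_diagnostics = list()
--     for diag in diagnostics:
--         if diag[bit_ind] == selective_bit:
--             selected_diagnostics.append(diag)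
--
--     return selected_diagnostics
-- ===== SOURCE B (Python) =====
-- def select_diagnostics(diagnostics, bit_ind, most_common=True):
--     # One pass: partition lines into 0-bucket / 1-bucket while accumulating the bit sum,
--     # then select the bucket by one boolean comparison.
--     zeros, ones, total = [], [], 0
--     for diag in diagnostics:
--         v = diag[bit_ind]
--         total += v
--         if v == 0:
--             zeros.append(diag)
--         elif v == 1:
--             ones.append(diag)
--     want_one = 2 * total >= len(diagnostics)
--     return ones if want_one == most_common else zeros
-- ===== Notes on version B (the rewrite author's own statement) =====
-- stated objective: simpler
-- what changed: Replaced the count-then-refilter two-pass structure by a single pass that partitions lines into a 0-bucket and a 1-bucket while summing the bit column, then returns one bucket chosen by a single boolean comparison (2*total >= len) == most_common.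
import Mathlib
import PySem

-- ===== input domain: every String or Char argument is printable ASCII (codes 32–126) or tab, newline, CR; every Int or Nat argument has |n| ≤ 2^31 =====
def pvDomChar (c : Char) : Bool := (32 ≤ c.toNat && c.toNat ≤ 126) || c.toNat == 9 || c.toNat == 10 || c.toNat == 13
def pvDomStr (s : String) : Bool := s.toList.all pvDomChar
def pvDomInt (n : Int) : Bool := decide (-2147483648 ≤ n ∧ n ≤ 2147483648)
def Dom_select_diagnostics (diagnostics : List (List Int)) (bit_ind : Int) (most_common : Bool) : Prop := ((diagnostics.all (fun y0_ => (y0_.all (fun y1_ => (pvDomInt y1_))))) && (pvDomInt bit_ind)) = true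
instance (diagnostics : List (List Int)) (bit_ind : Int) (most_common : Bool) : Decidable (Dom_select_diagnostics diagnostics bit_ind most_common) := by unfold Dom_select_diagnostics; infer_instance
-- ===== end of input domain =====

-- B replaces A's count-then-refilter two passes by one partition-and-sum pass plus a bucket selection (objective: simpler).

-- ===== PORT A =====
def select_diagnostics (diagnostics : List (List Int)) (bit_ind : Int) (most_common : Bool) : List (List Int) :=
  let num_ones : Int := (diagnostics.map (fun line => PySem.List.pyGetD line bit_ind 0)).sum
  let num_zeros : Int := (diagnostics.length : Int) - num_ones
  let selective_bit : Int :=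
    if most_common then (if num_ones ≥ num_zeros then 1 else 0)
    else (if num_zeros ≤ num_ones then 0 else 1)
  diagnostics.foldl
    (fun acc diag => if PySem.List.pyGetD diag bit_ind 0 = selective_bit then acc ++ [diag] else acc) []

-- ===== PORT B =====
def select_diagnostics_alt (diagnostics : List (List Int)) (bit_ind : Int) (most_common : Bool) : List (List Int) :=
  let st := diagnostics.foldl
    (fun (st : List (List Int) × List (List Int) × Int) diag =>
      let v := PySem.List.pyGetD diag bit_ind 0
      let st' := (st.1, st.2.1, st.2.2 + v)
      if v = 0 then (st'.1 ++ [diag], st'.2.1, st'.2.2)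
      else if v = 1 then (st'.1, st'.2.1 ++ [diag], st'.2.2)
      else st')
    ([], [], 0)
  let want_one : Bool := decide (2 * st.2.2 ≥ (diagnostics.length : Int))
  if want_one == most_common then st.2.1 else st.1

-- ===== PRECONDITION & SPEC =====
-- Pre_ excludes exactly the inputs where Python A raises IndexError: some line for which bit_ind is out of range.
def Pre_select_diagnostics (diagnostics : List (List Int)) (bit_ind : Int) (most_common : Bool) : Prop :=
  ∀ line ∈ diagnostics, PySem.Raise.InRange line.length bit_ind
instance (diagnostics : List (List Int)) (bit_ind : Int) (most_common : Bool) : Decidable (Pre_select_diagnostics diagnostics bit_ind most_common) := by unfold Pre_select_diagnostics; infer_instance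
def pvWitness_select_diagnostics : List (List Int) × Int × Bool := ([[1,0],[0,1],[1,1]], 0, true)
def Spec_select_diagnostics (diagnostics : List (List Int)) (bit_ind : Int) (most_common : Bool) (out : List (List Int)) : Prop := out = select_diagnostics_alt diagnostics bit_ind most_common
instance (diagnostics : List (List Int)) (bit_ind : Int) (most_common : Bool) (out : List (List Int)) : Decidable (Spec_select_diagnostics diagnostics bit_ind most_common out) := by unfold Spec_select_diagnostics; infer_instance

-- ===== CLAIM (what is proved, stated in full; the proofs are below) =====
def Claim_equal_select_diagnostics : Prop := ∀ (diagnostics : List (List Int)) (bit_ind : Int) (most_common : Bool), Dom_select_diagnostics diagnostics bit_ind most_common → Pre_select_diagnostics diagnostics bit_ind most_common → Spec_select_diagnostics diagnostics bit_ind most_common (select_diagnostics diagnostics bit_ind most_common)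

-- ===== LEMMAS AND PROOFS =====

-- The partition fold of B, characterised: buckets are filters, the third component is the running sum.
theorem alt_fold_spec (bit_ind : Int) (ds : List (List Int)) (z o : List (List Int)) (t : Int) :
    ds.foldl
      (fun (st : List (List Int) × List (List Int) × Int) diag =>
        let v := PySem.List.pyGetD diag bit_ind 0
        let st' := (st.1, st.2.1, st.2.2 + v)
        if v = 0 then (st'.1 ++ [diag], st'.2.1, st'.2.2)
        else if v = 1 then (st'.1, st'.2.1 ++ [diag], st'.2.2)
        else st')
      (z, o, t)
    = (z ++ ds.filter (fun d => PySem.List.pyGetD d bit_ind 0 = 0),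
       o ++ ds.filter (fun d => PySem.List.pyGetD d bit_ind 0 = 1),
       t + (ds.map (fun line => PySem.List.pyGetD line bit_ind 0)).sum) := by
  induction ds generalizing z o t with
  | nil => simp
  | cons d ds ih =>
    simp only [List.foldl_cons, List.filter_cons, List.map_cons, List.sum_cons]
    by_cases h0 : PySem.List.pyGetD d bit_ind 0 = 0
    · simp [h0, ih]
    · by_cases h1 : PySem.List.pyGetD d bit_ind 0 = 1
      · simp [h1, ih]
        ring
      · simp [h0, h1, ih]
        ring

-- ===== VERDICT (by name: the statement is the Claim_ definition above) =====
theorem select_diagnostics_spec : Claim_equal_select_diagnostics := by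
  intro ds bit_ind mc _ _
  unfold Spec_select_diagnostics select_diagnostics select_diagnostics_alt
  simp only [alt_fold_spec, List.nil_append, zero_add]
  rw [PySem.List.foldl_append_ite_eq_filter]
  set s : Int := (ds.map (fun line => PySem.List.pyGetD line bit_ind 0)).sum with hs
  by_cases hw : 2 * s ≥ (ds.length : Int)
  · have h1 : s ≥ (ds.length : Int) - s := by omega
    cases mc <;> simp [hw, h1]
  · have h1 : ¬ s ≥ (ds.length : Int) - s := by omega
    cases mc <;> simp [hw, h1]
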